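-- pv_equiv track=rewrite | github.com/mazayus/ProjectEuler | problem026.py | period_length
-- ===== SOURCE A (Python) =====
-- def period_length(denominator):
--     remainders = []
--     numerator = 1
--     while numerator not in remainders:
--         remainders.append(numerator)
--         numerator = numerator * 10 % denominator
--     if remainders[-1] == 0:
--         return 0
--     else:
--         return len(remainders) - remainders.index(numerator)
-- ===== SOURCE B (Python) =====
-- def period_length(denominator):
--     # Floyd cycle detection on x -> x*10 % denominator starting from 1:
--     # O(1) memory, no remainder list; then measure the cycle length directly.
--     def step(x):
--         return x * 10 % denominator
--     tortoise = step(1)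
--     hare = step(step(1))
--     while tortoise != hare:
--         tortoise = step(tortoise)
--         hare = step(step(hare))
--     if tortoise == 0:
--         return 0
--     length = 1
--     x = step(tortoise)
--     while x != tortoise:
--         x = step(x)
--         length += 1
--     return length
-- ===== Notes on version B (the rewrite author's own statement) =====
-- stated objective: faster
-- what changed: replaces A's grow-a-list-of-remainders-and-scan-it cycle detection with Floyd's tortoise-and-hare cycle detection on the map x -> x*10 % d (O(1) memory, no membership scans), followed by a direct walk around the cycle to measure its length
import Mathlib
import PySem

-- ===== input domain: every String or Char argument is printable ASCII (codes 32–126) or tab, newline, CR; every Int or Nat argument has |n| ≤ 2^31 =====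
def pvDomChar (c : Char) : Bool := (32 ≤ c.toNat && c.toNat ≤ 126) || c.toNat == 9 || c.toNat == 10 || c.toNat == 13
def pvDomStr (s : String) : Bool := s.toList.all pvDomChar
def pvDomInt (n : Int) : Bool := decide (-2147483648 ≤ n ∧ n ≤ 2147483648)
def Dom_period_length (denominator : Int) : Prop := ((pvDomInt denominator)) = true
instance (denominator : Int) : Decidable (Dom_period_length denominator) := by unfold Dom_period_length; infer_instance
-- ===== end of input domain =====

-- B replaces A's grow-a-list-and-scan-it cycle detection with Floyd's tortoise-and-hare
-- on the map x ↦ x*10 % d (no list, O(1) memory) plus a direct walk measuring the cycle.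

-- ===== PORT A =====
-- A's while loop, made total by fuel: the loop visits pairwise-distinct values drawn
-- from a set of at most |d|+2 elements, so fuel |d|+3 is never exhausted (proved below).
def aLoop (d : Int) : Nat → List Int → Int → List Int × Int
  | 0, rs, n => (rs, n)
  | fuel+1, rs, n =>
    if n ∈ rs then (rs, n)
    else aLoop d fuel (rs ++ [n]) (PySem.Int.mod (n * 10) d)

def period_length (denominator : Int) : Int :=
  let st := aLoop denominator (denominator.natAbs + 3) [] 1
  -- remainders[-1] and remainders.index(numerator): in every real run the list is
  -- nonempty and the numerator is a member, so the defaults are never used.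
  if PySem.List.pyGetD st.1 (-1) 0 = 0 then 0
  else (st.1.length : Int) - (((PySem.List.index? st.1 st.2).getD 0 : Nat) : Int)

-- ===== PORT B =====
-- B's local helper `step`
def bStep (d x : Int) : Int := PySem.Int.mod (x * 10) d

-- first while loop of B: advance tortoise by one step, hare by two, until they meet
def floydLoop (d : Int) : Nat → Int → Int → Int
  | 0, t, _ => t
  | fuel+1, t, h =>
    if t = h then t
    else floydLoop d fuel (bStep d t) (bStep d (bStep d h))

-- second while loop of B: walk around the cycle from the meeting point, counting steps
def lenLoop (d : Int) : Nat → Int → Int → Int → Int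
  | 0, _, _, len => len
  | fuel+1, t0, x, len =>
    if x = t0 then len
    else lenLoop d fuel t0 (bStep d x) (len + 1)

def period_length_alt (denominator : Int) : Int :=
  let t := floydLoop denominator (denominator.natAbs + 3)
              (bStep denominator 1) (bStep denominator (bStep denominator 1))
  if t = 0 then 0
  else lenLoop denominator (denominator.natAbs + 3) t (bStep denominator t) 1

-- ===== PRECONDITION & SPEC =====
-- denominator = 0 makes '% denominator' raise ZeroDivisionError in A (and in B).
def Pre_period_length (denominator : Int) : Prop := denominator ≠ 0
instance (denominator : Int) : Decidable (Pre_period_length denominator) := by unfold Pre_period_length; infer_instance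
def pvWitness_period_length : Int := 7

def Spec_period_length (denominator : Int) (out : Int) : Prop := out = period_length_alt denominator
instance (denominator : Int) (out : Int) : Decidable (Spec_period_length denominator out) := by unfold Spec_period_length; infer_instance

-- ===== CLAIM (what is proved, stated in full; the proofs are below) =====
def Claim_equal_period_length : Prop := ∀ (denominator : Int), Dom_period_length denominator → Pre_period_length denominator → Spec_period_length denominator (period_length denominator)

-- ===== LEMMAS AND PROOFS =====

-- the abstract orbit of 1 under x ↦ x*10 % d
def pvSeq (d : Int) : Nat → Int
  | 0 => 1
  | k+1 => bStep d (pvSeq d k)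

-- K: index of the first value that repeats an earlier one (A's loop stops there)
noncomputable def pvK (d : Int) : Nat := sInf {k | ∃ j, j < k ∧ pvSeq d j = pvSeq d k}
-- J: the earlier index the value at K repeats (start of the cycle)
noncomputable def pvJ (d : Int) : Nat := sInf {j | j < pvK d ∧ pvSeq d j = pvSeq d (pvK d)}
-- L: the cycle length
noncomputable def pvL (d : Int) : Nat := pvK d - pvJ d

-- the finite pool of values the orbit can visit: the seed 1 plus every Python-mod residue of d
def pvPool (d : Int) : List Int :=
  1 :: (List.range d.natAbs).map (fun k : Nat => if 0 < d then (k : Int) else -(k : Int))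

lemma pvPool_length (d : Int) : (pvPool d).length = d.natAbs + 1 := by
  simp [pvPool]

lemma mod_mem_pvPool (d y : Int) (hd : d ≠ 0) : PySem.Int.mod y d ∈ pvPool d := by
  rcases lt_or_gt_of_ne hd with hneg | hpos
  · have hb := PySem.Int.mod_neg_bounds y hneg
    refine List.mem_cons_of_mem _ ?_
    refine List.mem_map.mpr ⟨(-(PySem.Int.mod y d)).toNat, List.mem_range.mpr (by omega), ?_⟩
    rw [if_neg (show ¬ 0 < d by omega)]
    omega
  · have h0 := PySem.Int.mod_nonneg y hpos
    have h1 := PySem.Int.mod_lt y hpos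
    refine List.mem_cons_of_mem _ ?_
    refine List.mem_map.mpr ⟨(PySem.Int.mod y d).toNat, List.mem_range.mpr (by omega), ?_⟩
    rw [if_pos hpos]
    omega

lemma pvSeq_mem (d : Int) (hd : d ≠ 0) (k : Nat) : pvSeq d k ∈ 1 :: pvPool d := by
  cases k with
  | zero => exact List.mem_cons_self
  | succ k => exact List.mem_cons_of_mem _ (mod_mem_pvPool d _ hd)

lemma bStep_zero (d : Int) : bStep d 0 = 0 := by
  unfold bStep
  exact (PySem.Int.mod_eq_zero_iff_dvd _ _).mpr (by simp)

lemma pvRep_exists (d : Int) (hd : d ≠ 0) :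
    ∃ b, b ≤ d.natAbs + 2 ∧ ∃ j, j < b ∧ pvSeq d j = pvSeq d b := by
  obtain ⟨a, ha, b, hb, hne, heq⟩ :=
    Finset.exists_ne_map_eq_of_card_lt_of_maps_to (s := Finset.range (d.natAbs + 3))
      (t := (1 :: pvPool d).toFinset) (f := pvSeq d)
      (by
        have h1 : ((1 :: pvPool d).toFinset).card ≤ (1 :: pvPool d).length :=
          List.toFinset_card_le _
        have h2 : (1 :: pvPool d).length = d.natAbs + 2 := by simp [pvPool_length]
        simp only [Finset.card_range]
        omega)
      (fun k _ => List.mem_toFinset.mpr (pvSeq_mem d hd k))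
  simp only [Finset.mem_range] at ha hb
  rcases Nat.lt_or_ge a b with h | h
  · exact ⟨b, by omega, a, h, heq⟩
  · have h' : b < a := by omega
    exact ⟨a, by omega, b, h', heq.symm⟩


lemma pvK_rep (d : Int) (hd : d ≠ 0) : ∃ j, j < pvK d ∧ pvSeq d j = pvSeq d (pvK d) := by
  obtain ⟨b, _, hb⟩ := pvRep_exists d hd
  have : pvK d ∈ {k | ∃ j, j < k ∧ pvSeq d j = pvSeq d k} :=
    Nat.sInf_mem ⟨b, hb⟩
  exact this


lemma pvK_le (d : Int) (hd : d ≠ 0) : pvK d ≤ d.natAbs + 2 := by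
  obtain ⟨b, hble, hb⟩ := pvRep_exists d hd
  exact le_trans (Nat.sInf_le hb) hble


lemma pvK_min (d : Int) (b : Nat) (hb : b < pvK d) :
    ¬ ∃ j, j < b ∧ pvSeq d j = pvSeq d b := by
  have : b ∉ {k | ∃ j, j < k ∧ pvSeq d j = pvSeq d k} := Nat.notMem_of_lt_sInf hb
  exact this


lemma pvSeq_inj (d : Int) (a b : Nat) (hab : a < b) (hb : b < pvK d) :
    pvSeq d a ≠ pvSeq d b := by
  intro h
  exact pvK_min d b hb ⟨a, hab, h⟩


lemma pvJ_spec (d : Int) (hd : d ≠ 0) :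
    pvJ d < pvK d ∧ pvSeq d (pvJ d) = pvSeq d (pvK d) := by
  obtain ⟨j, hj⟩ := pvK_rep d hd
  have : pvJ d ∈ {j | j < pvK d ∧ pvSeq d j = pvSeq d (pvK d)} :=
    Nat.sInf_mem ⟨j, hj⟩
  exact this


lemma pvJ_min (d : Int) (hd : d ≠ 0) (q : Nat) (hq : q < pvJ d) :
    pvSeq d q ≠ pvSeq d (pvK d) := by
  intro h
  have : q ∉ {j | j < pvK d ∧ pvSeq d j = pvSeq d (pvK d)} := Nat.notMem_of_lt_sInf hq
  exact this ⟨lt_trans hq (pvJ_spec d hd).1, h⟩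


lemma pvL_pos (d : Int) (hd : d ≠ 0) : 1 ≤ pvL d := by
  have := (pvJ_spec d hd).1
  unfold pvL
  omega


-- tail periodicity: from index J on, the orbit is periodic with period L
lemma pvSeq_period (d : Int) (hd : d ≠ 0) (k : Nat) (hk : pvJ d ≤ k) :
    pvSeq d (k + pvL d) = pvSeq d k := by
  induction k, hk using Nat.le_induction with
  | base =>
    have hJ := pvJ_spec d hd
    have hK : pvJ d + pvL d = pvK d := by unfold pvL; omega
    rw [hK]
    exact hJ.2.symm
  | succ k hk ih =>
    have h1 : k + 1 + pvL d = (k + pvL d) + 1 := by omega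
    rw [h1]
    show bStep d (pvSeq d (k + pvL d)) = bStep d (pvSeq d k)
    rw [ih]


lemma pvSeq_period_mul (d : Int) (hd : d ≠ 0) (k c : Nat) (hk : pvJ d ≤ k) :
    pvSeq d (k + c * pvL d) = pvSeq d k := by
  induction c with
  | zero => simp
  | succ c ih =>
    have h1 : k + (c + 1) * pvL d = (k + c * pvL d) + pvL d := by ring
    rw [h1, pvSeq_period d hd _ (by omega), ih]


-- characterization of every repeat: it happens at or after J, with a gap divisible by L
lemma pvRep_char (d : Int) (hd : d ≠ 0) (b : Nat) :
    ∀ a, a < b → pvSeq d a = pvSeq d b → pvJ d ≤ a ∧ pvL d ∣ (b - a) := by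
  induction b using Nat.strong_induction_on with
  | _ b ih =>
    intro a hab heq
    rcases Nat.lt_or_ge b (pvK d) with hbK | hbK
    · exact absurd heq (pvSeq_inj d a b hab hbK)
    · rcases Nat.eq_or_lt_of_le hbK with hbK' | hbK'
      · -- b = K: a must be J
        have hJ := pvJ_spec d hd
        have haJ : a = pvJ d := by
          by_contra hne
          have haK : a < pvK d := by omega
          have heq' : pvSeq d a = pvSeq d (pvJ d) := by
            rw [heq, ← hbK', ← hJ.2]
          rcases Nat.lt_or_ge a (pvJ d) with h | h
          · exact pvJ_min d hd a h (by rw [heq, ← hbK'])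
          · exact pvSeq_inj d (pvJ d) a (by omega) haK heq'.symm
        constructor
        · omega
        · have : b - a = pvL d := by unfold pvL; omega
          rw [this]
      · -- b > K: fold back by one period
        have hL := pvL_pos d hd
        have hJK : pvJ d + pvL d = pvK d := by
          have := (pvJ_spec d hd).1; unfold pvL; omega
        have hb' : pvJ d ≤ b - pvL d := by omega
        have hper : pvSeq d b = pvSeq d (b - pvL d) := by
          have : (b - pvL d) + pvL d = b := by omega
          conv_lhs => rw [← this]
          exact pvSeq_period d hd _ hb'
        rcases Nat.lt_trichotomy a (b - pvL d) with h | h | h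
        · have := ih (b - pvL d) (by omega) a h (by rw [heq, hper])
          refine ⟨this.1, ?_⟩
          have h1 : b - a = (b - pvL d - a) + pvL d := by omega
          rw [h1]
          exact dvd_add this.2 dvd_rfl
        · refine ⟨by omega, ?_⟩
          have h1 : b - a = pvL d := by omega
          rw [h1]
        · -- a strictly between b - L and b: contradiction
          exfalso
          have := ih a (by omega) (b - pvL d) h (by rw [← hper, heq])
          obtain ⟨c, hc⟩ := this.2
          have hlt : a - (b - pvL d) < pvL d := by omega
          rcases c with _ | c
          · simp at hc
            omega
          · have hle : pvL d ≤ pvL d * (c + 1) := by nlinarith [pvL_pos d hd]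
            omega


-- the first meeting index of Floyd's loop is bounded by K
lemma pvFloyd_exists (d : Int) (hd : d ≠ 0) :
    ∃ i, 1 ≤ i ∧ i ≤ pvK d ∧ pvSeq d i = pvSeq d (2 * i) := by
  have hL := pvL_pos d hd
  have hJ := (pvJ_spec d hd).1
  have hJK : pvJ d + pvL d = pvK d := by unfold pvL; omega
  have hdiv := Nat.div_add_mod (pvJ d) (pvL d)
  have hmod := Nat.mod_lt (pvJ d) (show 0 < pvL d by omega)
  have hsucc : pvL d * (pvJ d / pvL d + 1) = pvL d * (pvJ d / pvL d) + pvL d :=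
    Nat.mul_succ _ _
  refine ⟨pvL d * (pvJ d / pvL d + 1), by omega, by omega, ?_⟩
  have h2i : 2 * (pvL d * (pvJ d / pvL d + 1)) =
      pvL d * (pvJ d / pvL d + 1) + (pvJ d / pvL d + 1) * pvL d := by ring
  rw [h2i, pvSeq_period_mul d hd _ _ (by omega)]


lemma floydLoop_run (d : Int) (_hd : d ≠ 0) (i1 : Nat) (_h1 : 1 ≤ i1)
    (hmeet : pvSeq d i1 = pvSeq d (2 * i1)) :
    ∀ (fuel i : Nat), 1 ≤ i → i ≤ i1 → i1 < fuel + i →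
    ∃ i', i ≤ i' ∧ i' ≤ i1 ∧ pvSeq d i' = pvSeq d (2 * i') ∧
      floydLoop d fuel (pvSeq d i) (pvSeq d (2 * i)) = pvSeq d i' := by
  intro fuel
  induction fuel with
  | zero => intro i h1 h2 h3; omega
  | succ fuel ih =>
    intro i h1 h2 h3
    by_cases hmeet' : pvSeq d i = pvSeq d (2 * i)
    · exact ⟨i, le_refl i, h2, hmeet', by simp [floydLoop, hmeet']⟩
    · have hne : i ≠ i1 := fun h => hmeet' (h ▸ hmeet)
      have hstep : floydLoop d (fuel + 1) (pvSeq d i) (pvSeq d (2 * i)) =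
          floydLoop d fuel (pvSeq d (i + 1)) (pvSeq d (2 * (i + 1))) := by
        have e1 : bStep d (pvSeq d i) = pvSeq d (i + 1) := rfl
        have e2 : bStep d (bStep d (pvSeq d (2 * i))) = pvSeq d (2 * (i + 1)) := by
          show bStep d (bStep d (pvSeq d (2 * i))) = pvSeq d (2 * i + 1 + 1)
          rfl
        simp [floydLoop, hmeet', e1, e2]
      obtain ⟨i', hi'1, hi'2, hi'3, hi'4⟩ := ih (i + 1) (by omega) (by omega) (by omega)
      exact ⟨i', by omega, hi'2, hi'3, by rw [hstep, hi'4]⟩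


lemma lenLoop_run (d : Int) (hd : d ≠ 0) (c : Nat) (hc : pvJ d ≤ c) :
    ∀ (fuel p : Nat), 1 ≤ p → p ≤ pvL d → pvL d < fuel + p →
    lenLoop d fuel (pvSeq d c) (pvSeq d (c + p)) (p : Int) = (pvL d : Int) := by
  intro fuel
  induction fuel with
  | zero => intro p h1 h2 h3; omega
  | succ fuel ih =>
    intro p h1 h2 h3
    by_cases hstop : pvSeq d (c + p) = pvSeq d c
    · have hpL : p = pvL d := by
        rcases Nat.eq_or_lt_of_le h2 with h | h
        · exact h
        · exfalso
          have := pvRep_char d hd (c + p) c (by omega) hstop.symm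
          obtain ⟨c', hc'⟩ := this.2
          have hcp : c + p - c = p := by omega
          rw [hcp] at hc'
          rcases c' with _ | c'
          · omega
          · have := pvL_pos d hd; nlinarith [hc']
      subst hpL
      simp [lenLoop, hstop]
    · have hpne : p ≠ pvL d := by
        intro h
        exact hstop (h ▸ pvSeq_period d hd c hc)
      have hstep : lenLoop d (fuel + 1) (pvSeq d c) (pvSeq d (c + p)) (p : Int) =
          lenLoop d fuel (pvSeq d c) (pvSeq d (c + (p + 1))) ((p + 1 : Nat) : Int) := by
        have e1 : bStep d (pvSeq d (c + p)) = pvSeq d (c + (p + 1)) := rfl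
        have e2 : ((p : Int) + 1) = ((p + 1 : Nat) : Int) := by push_cast; ring
        simp only [lenLoop]
        rw [if_neg hstop, e1, e2]
      rw [hstep]
      exact ih (p + 1) (by omega) (by omega) (by omega)


lemma aLoop_run (d : Int) (hd : d ≠ 0) :
    ∀ (fuel i : Nat), i ≤ pvK d → pvK d < fuel + i →
    aLoop d fuel ((List.range i).map (pvSeq d)) (pvSeq d i) =
      ((List.range (pvK d)).map (pvSeq d), pvSeq d (pvK d)) := by
  intro fuel
  induction fuel with
  | zero => intro i h1 h2; omega
  | succ fuel ih =>
    intro i h1 h2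
    have hmem_iff : (pvSeq d i ∈ (List.range i).map (pvSeq d)) ↔ ∃ j, j < i ∧ pvSeq d j = pvSeq d i := by
      simp [List.mem_map, List.mem_range]
    rcases Nat.eq_or_lt_of_le h1 with hiK | hiK
    · -- i = K: the membership test succeeds, loop stops
      have hrep : ∃ j, j < i ∧ pvSeq d j = pvSeq d i := by
        subst hiK; exact pvK_rep d hd
      have hmem : pvSeq d i ∈ (List.range i).map (pvSeq d) := hmem_iff.mpr hrep
      subst hiK
      simp only [aLoop]
      rw [if_pos hmem]
    · -- i < K: no repeat yet, loop appends and recurses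
      have hnorep : ¬ ∃ j, j < i ∧ pvSeq d j = pvSeq d i := pvK_min d i hiK
      have hmem : ¬ (pvSeq d i ∈ (List.range i).map (pvSeq d)) := fun h => hnorep (hmem_iff.mp h)
      have happ : (List.range i).map (pvSeq d) ++ [pvSeq d i] = (List.range (i + 1)).map (pvSeq d) := by
        rw [List.range_succ, List.map_append]; rfl
      have hnext : PySem.Int.mod (pvSeq d i * 10) d = pvSeq d (i + 1) := rfl
      rw [show aLoop d (fuel + 1) ((List.range i).map (pvSeq d)) (pvSeq d i) =
          aLoop d fuel ((List.range i).map (pvSeq d) ++ [pvSeq d i]) (PySem.Int.mod (pvSeq d i * 10) d) by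
        simp only [aLoop]
        rw [if_neg hmem]]
      rw [happ, hnext]
      exact ih (i + 1) (by omega) (by omega)


-- ===== VERDICT (by name: the statement is the Claim_ definition above) =====
lemma pvFinal (d : Int) (hd : d ≠ 0) : period_length d = period_length_alt d := by
  have hK_le := pvK_le d hd
  have hKrep := pvK_rep d hd
  have hJ := pvJ_spec d hd
  have hL := pvL_pos d hd
  have hJK : pvJ d + pvL d = pvK d := by unfold pvL; omega
  have hK1 : 1 ≤ pvK d := by obtain ⟨j, hj, _⟩ := hKrep; omega
  -- A's loop runs out to the first repeat
  have hA : aLoop d (d.natAbs + 3) [] 1 =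
      ((List.range (pvK d)).map (pvSeq d), pvSeq d (pvK d)) := by
    have h := aLoop_run d hd (d.natAbs + 3) 0 (by omega) (by omega)
    simpa [pvSeq] using h
  -- remainders[-1]
  have hlast : PySem.List.pyGetD ((List.range (pvK d)).map (pvSeq d)) (-1) 0 =
      pvSeq d (pvK d - 1) := by
    have hdecomp : (List.range (pvK d)).map (pvSeq d)
        = (List.range (pvK d - 1)).map (pvSeq d) ++ [pvSeq d (pvK d - 1)] := by
      conv_lhs => rw [show pvK d = (pvK d - 1) + 1 by omega]
      rw [List.range_succ, List.map_append]
      rfl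
    rw [hdecomp, PySem.List.pyGetD_neg_one_append_singleton]
  -- remainders.index(numerator) finds J
  have hidx : PySem.List.index? ((List.range (pvK d)).map (pvSeq d)) (pvSeq d (pvK d)) =
      some (pvJ d) := by
    refine (PySem.List.index?_eq_some_iff _ _ _).mpr
      ⟨(List.range (pvJ d)).map (pvSeq d),
       (List.range (pvK d - pvJ d - 1)).map (fun x => pvSeq d (pvJ d + 1 + x)), ?_, by simp, ?_⟩
    · conv_lhs => rw [show pvK d = (pvJ d + 1) + (pvK d - pvJ d - 1) by omega]
      rw [List.range_add, List.map_append, List.range_succ, List.map_append,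
          List.map_map, List.append_assoc]
      simp only [List.map_cons, List.map_nil, List.singleton_append]
      rw [hJ.2]
      rfl
    · intro hmem
      obtain ⟨q, hq, hqe⟩ := List.mem_map.mp hmem
      exact pvJ_min d hd q (List.mem_range.mp hq) hqe
  -- B's Floyd loop meets on the cycle
  obtain ⟨i1, hi11, hi1K, hi1meet⟩ := pvFloyd_exists d hd
  obtain ⟨istar, hii, hiK, himeet, hrun⟩ :=
    floydLoop_run d hd i1 hi11 hi1meet (d.natAbs + 3) 1 le_rfl hi11 (by omega)
  have hB1 : floydLoop d (d.natAbs + 3) (bStep d 1) (bStep d (bStep d 1)) = pvSeq d istar := by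
    rw [show bStep d (bStep d 1) = pvSeq d (2 * 1) from rfl,
        show bStep d 1 = pvSeq d 1 from rfl]
    exact hrun
  have hJi : pvJ d ≤ istar := (pvRep_char d hd (2 * istar) istar (by omega) himeet).1
  unfold period_length period_length_alt
  simp only [hA, hB1, hlast, hidx, List.length_map, List.length_range, Option.getD_some]
  by_cases hz : pvSeq d (pvK d - 1) = 0
  · -- the cycle is {0}: both sides return 0
    have hKzero : pvSeq d (pvK d) = 0 := by
      rw [show pvK d = (pvK d - 1) + 1 by omega]
      show bStep d (pvSeq d (pvK d - 1)) = 0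
      rw [hz, bStep_zero]
    have hall : ∀ t, pvSeq d ((pvK d - 1) + t) = 0 := by
      intro t
      induction t with
      | zero => simpa using hz
      | succ t ih =>
        show bStep d (pvSeq d ((pvK d - 1) + t)) = 0
        rw [ih, bStep_zero]
    have hJeq : pvJ d = pvK d - 1 := by
      by_contra hne
      have h1 : pvSeq d (pvJ d) = pvSeq d (pvK d - 1) := by rw [hJ.2, hKzero, hz]
      rcases Nat.lt_or_ge (pvJ d) (pvK d - 1) with h | h
      · exact pvSeq_inj d (pvJ d) (pvK d - 1) h (by omega) h1
      · omega
    have hi0 : pvSeq d istar = 0 := by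
      rw [show istar = (pvK d - 1) + (istar - (pvK d - 1)) by omega]
      exact hall _
    rw [if_pos hz, if_pos hi0]
  · -- a genuine cycle: A returns K - J, B measures the cycle length L = K - J
    have hi0 : pvSeq d istar ≠ 0 := by
      intro h0
      have hnext : pvSeq d (istar + 1) = pvSeq d istar := by
        show bStep d (pvSeq d istar) = pvSeq d istar
        rw [h0, bStep_zero]
      have hdvd := (pvRep_char d hd (istar + 1) istar (by omega) hnext.symm).2
      have hL1 : pvL d = 1 := Nat.dvd_one.mp (by simpa using hdvd)
      have hiJ : pvSeq d istar = pvSeq d (pvJ d) := by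
        rw [show istar = pvJ d + (istar - pvJ d) * pvL d by rw [hL1]; omega]
        exact pvSeq_period_mul d hd _ _ le_rfl
      have : pvSeq d (pvK d - 1) = 0 := by
        rw [show pvK d - 1 = pvJ d by omega, ← hiJ, h0]
      exact hz this
    rw [if_neg hz, if_neg hi0]
    have hlen : lenLoop d (d.natAbs + 3) (pvSeq d istar) (bStep d (pvSeq d istar)) 1 =
        (pvL d : Int) := by
      have h := lenLoop_run d hd istar hJi (d.natAbs + 3) 1 le_rfl hL (by omega)
      rw [show bStep d (pvSeq d istar) = pvSeq d (istar + 1) from rfl]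
      simpa using h
    rw [hlen]
    omega

-- ===== VERDICT (by name: the statement is the Claim_ definition above) =====
theorem period_length_spec : Claim_equal_period_length := by
  intro d _ hd
  exact pvFinal d hd
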